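-- pv_equiv track=rewrite | github.com/surya3141/IntelliPart | 02_deep_analysis/advanced_analytics.py | _get_demand_recommendation_fast
-- ===== SOURCE A (Python) =====
-- def _get_demand_recommendation_fast(score: int) -> str:
--     """
--     Provides a quick recommendation based on a demand score.
--
--     Args:
--         score (int): The demand score.
--
--     Returns:
--         str: A recommendation string.
--     """
--     recommendations = {
--         6: "URGENT: High-priority restocking needed",
--         4: "MEDIUM: Monitor closely and plan restocking",
--         2: "LOW: Regular monitoring sufficient",
--         0: "STABLE: No immediate action needed"
--     }
--     # Find closest score
--     for threshold in [6, 4, 2, 0]: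
--         if score >= threshold:
--             return recommendations[threshold]
--     return recommendations[0]
-- ===== SOURCE B (Python) =====
-- def _get_demand_recommendation_fast(score: int) -> str:
--     labels = [
--         "STABLE: No immediate action needed",
--         "LOW: Regular monitoring sufficient",
--         "MEDIUM: Monitor closely and plan restocking",
--         "URGENT: High-priority restocking needed",
--     ]
--     idx = min(max(score, 0) // 2, 3)
--     return labels[idx]
-- ===== Notes on version B (the rewrite author's own statement) =====
-- stated objective: simpler
-- what changed: Replaces the descending-threshold scan over a dict with a closed-form arithmetic bucket index (clamped halving) into an ordered label list.
import Mathlib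
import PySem

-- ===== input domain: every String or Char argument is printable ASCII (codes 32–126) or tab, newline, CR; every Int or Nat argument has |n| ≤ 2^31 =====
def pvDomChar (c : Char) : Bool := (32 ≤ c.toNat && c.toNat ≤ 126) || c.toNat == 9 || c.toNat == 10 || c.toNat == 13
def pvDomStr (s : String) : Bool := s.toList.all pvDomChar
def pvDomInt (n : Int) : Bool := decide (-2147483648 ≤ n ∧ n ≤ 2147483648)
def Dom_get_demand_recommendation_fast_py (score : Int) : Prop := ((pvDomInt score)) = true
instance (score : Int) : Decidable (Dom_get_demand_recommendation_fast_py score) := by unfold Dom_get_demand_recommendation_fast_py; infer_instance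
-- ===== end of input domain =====

-- B replaces A's descending-threshold scan with a closed-form bucket index into a label list (simpler).

-- ===== PORT A =====
-- the dict literal of A (insertion order 6,4,2,0)
def pvRecsA : PySem.Dict Int String :=
  ((PySem.Dict.empty.insert 6 "URGENT: High-priority restocking needed").insert
      4 "MEDIUM: Monitor closely and plan restocking").insert
    2 "LOW: Regular monitoring sufficient" |>.insert 0 "STABLE: No immediate action needed"

-- the 'for threshold in [6,4,2,0]' loop with early return
def pvALoop (score : Int) : List Int → String
  | [] => pvRecsA.getD 0 ""
  | t :: ts => if score ≥ t then pvRecsA.getD t "" else pvALoop score ts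

def get_demand_recommendation_fast_py (score : Int) : String :=
  pvALoop score [6, 4, 2, 0]

-- ===== PORT B =====
def pvLabelsB : List String :=
  ["STABLE: No immediate action needed",
   "LOW: Regular monitoring sufficient",
   "MEDIUM: Monitor closely and plan restocking",
   "URGENT: High-priority restocking needed"]

def get_demand_recommendation_fast_py_alt (score : Int) : String :=
  let idx := min (PySem.Int.floordiv (max score 0) 2) 3
  (PySem.List.pyGet? pvLabelsB idx).getD ""

-- ===== PRECONDITION & SPEC =====
def Spec_get_demand_recommendation_fast_py (score : Int) (out : String) : Prop := out = get_demand_recommendation_fast_py_alt score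
instance (score : Int) (out : String) : Decidable (Spec_get_demand_recommendation_fast_py score out) := by unfold Spec_get_demand_recommendation_fast_py; infer_instance

-- ===== CLAIM (what is proved, stated in full; the proofs are below) =====
def Claim_equal_get_demand_recommendation_fast_py : Prop := ∀ (score : Int), Dom_get_demand_recommendation_fast_py score → Spec_get_demand_recommendation_fast_py score (get_demand_recommendation_fast_py score)

-- ===== LEMMAS AND PROOFS =====
theorem pv_eq_on (score : Int) :
    get_demand_recommendation_fast_py score = get_demand_recommendation_fast_py_alt score := by
  have hfd : PySem.Int.floordiv (max score 0) 2 = (max score 0) / 2 :=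
    PySem.Int.floordiv_eq_ediv_of_pos (by omega)
  unfold get_demand_recommendation_fast_py get_demand_recommendation_fast_py_alt
  rw [hfd]
  rcases le_or_gt 6 score with h6 | h6
  · have hi : min ((max score 0) / 2) 3 = 3 := by omega
    simp [pvALoop, hi, h6, pvRecsA, pvLabelsB, PySem.List.pyGet?, PySem.List.pyIdx?, PySem.Dict.getD]
    decide
  rcases le_or_gt 4 score with h4 | h4
  · have hi : min ((max score 0) / 2) 3 = 2 := by omega
    simp [pvALoop, hi, h4, show ¬ score ≥ 6 by omega, pvRecsA, pvLabelsB,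
      PySem.List.pyGet?, PySem.List.pyIdx?, PySem.Dict.getD]
    decide
  rcases le_or_gt 2 score with h2 | h2
  · have hi : min ((max score 0) / 2) 3 = 1 := by omega
    simp [pvALoop, hi, h2, show ¬ score ≥ 6 by omega, show ¬ score ≥ 4 by omega, pvRecsA, pvLabelsB,
      PySem.List.pyGet?, PySem.List.pyIdx?, PySem.Dict.getD]
    decide
  · have hi : min ((max score 0) / 2) 3 = 0 := by omega
    rcases le_or_gt 0 score with h0 | h0
    · have hs : score / 2 = 0 := by omega
      simp [pvALoop, h0, hs, show ¬ score ≥ 6 by omega, show ¬ score ≥ 4 by omega,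
        show ¬ score ≥ 2 by omega, pvRecsA, pvLabelsB,
        PySem.List.pyGet?, PySem.List.pyIdx?, PySem.Dict.getD]
    · simp [pvALoop, hi, show ¬ score ≥ 6 by omega, show ¬ score ≥ 4 by omega,
        show ¬ score ≥ 2 by omega, show ¬ score ≥ 0 by omega, pvRecsA, pvLabelsB,
        PySem.List.pyGet?, PySem.List.pyIdx?, PySem.Dict.getD]

-- ===== VERDICT (by name: the statement is the Claim_ definition above) =====
theorem get_demand_recommendation_fast_py_spec : Claim_equal_get_demand_recommendation_fast_py := by
  intro score _
  exact pv_eq_on score
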